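-- pv_equiv track=rewrite | github.com/YifanWang2002/minsy_mvp_backend_v2 | src/engine/strategy/errors.py | json_path_to_pointer
-- ===== SOURCE A (Python) =====
-- def json_path_to_pointer(path: str) -> str:
--     """Convert a simple '$.a.b[0]' jsonpath into JSON Pointer '/a/b/0'."""
--     if not isinstance(path, str):
--         return ""
--     text = path.strip()
--     if not text or text == "$":
--         return ""
--     if not text.startswith("$"):
--         return ""
--
--     pointer_parts: list[str] = []
--     token = ""
--     index_mode = False
--     index_buffer = ""
--
--     for ch in text[1:]:
--         if index_mode:
--             if ch == "]":
--                 if index_buffer: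
--                     pointer_parts.append(index_buffer)
--                 index_mode = False
--                 index_buffer = ""
--                 continue
--             index_buffer += ch
--             continue
--
--         if ch == ".":
--             if token:
--                 pointer_parts.append(token)
--                 token = ""
--             continue
--         if ch == "[":
--             if token:
--                 pointer_parts.append(token)
--                 token = ""
--             index_mode = True
--             index_buffer = ""
--             continue
--         token += ch
--
--     if token:
--         pointer_parts.append(token)
--
--     if not pointer_parts:
--         return ""
--
--     escaped = [part.replace("~", "~0").replace("/", "~1") for part in pointer_parts]
--     return "/" + "/".join(escaped)
-- ===== SOURCE B (Python) =====
-- def json_path_to_pointer(path: str) -> str: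
--     """Convert a simple '$.a.b[0]' jsonpath into JSON Pointer '/a/b/0'."""
--     if not isinstance(path, str):
--         return ""
--     text = path.strip()
--     if not text or text == "$":
--         return ""
--     if not text.startswith("$"):
--         return ""
--
--     body = text[1:]
--     n = len(body)
--     parts: list[str] = []
--     i = 0
--     while i < n:
--         c = body[i]
--         if c == ".":
--             i += 1
--         elif c == "[":
--             j = i + 1
--             while j < n and body[j] != "]":
--                 j += 1
--             if j == n:
--                 break  # unterminated bracket: its content is dropped
--             if j > i + 1:
--                 parts.append(body[i + 1:j])
--             i = j + 1
--         else:
--             j = i + 1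
--             while j < n and body[j] != "." and body[j] != "[":
--                 j += 1
--             parts.append(body[i:j])
--             i = j
--
--     if not parts:
--         return ""
--     return "/" + "/".join(p.replace("~", "~0").replace("/", "~1") for p in parts)
-- ===== Notes on version B (the rewrite author's own statement) =====
-- stated objective: alternative
-- what changed: Replaces A's per-character mode/accumulator state machine by an index-jumping tokenizer that scans each whole segment (dotted name or bracket content) and slices it out of the string.
import Mathlib
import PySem

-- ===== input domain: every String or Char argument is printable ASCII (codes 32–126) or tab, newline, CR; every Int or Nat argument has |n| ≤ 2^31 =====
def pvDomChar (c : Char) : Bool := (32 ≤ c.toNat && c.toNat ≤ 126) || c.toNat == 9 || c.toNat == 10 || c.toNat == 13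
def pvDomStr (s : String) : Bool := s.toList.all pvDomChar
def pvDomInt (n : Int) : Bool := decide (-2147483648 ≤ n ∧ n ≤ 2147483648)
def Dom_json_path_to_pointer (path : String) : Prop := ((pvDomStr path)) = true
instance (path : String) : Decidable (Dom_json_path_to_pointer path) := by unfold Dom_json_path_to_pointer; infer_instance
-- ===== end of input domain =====

-- B replaces A's per-character mode/accumulator state machine by an index-jumping
-- tokenizer that scans whole segments and slices them out (objective: alternative).

-- escaping 'part.replace("~", "~0").replace("/", "~1")' (shared verbatim by A and B)
def pvEscape (p : List Char) : List Char :=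
  PySem.Chars.replace (PySem.Chars.replace p ['~'] ['~', '0']) ['/'] ['~', '1']

-- ===== PORT A =====
-- one step of A's for-loop; state = (pointer_parts, token, index_mode, index_buffer)
def pvStepA (st : List (List Char) × List Char × Bool × List Char) (ch : Char) :
    List (List Char) × List Char × Bool × List Char :=
  match st with
  | (parts, token, indexMode, buf) =>
    if indexMode then
      if ch = ']' then ((if buf ≠ [] then parts ++ [buf] else parts), token, false, [])
      else (parts, token, indexMode, buf ++ [ch])
    else if ch = '.' then ((if token ≠ [] then parts ++ [token] else parts), [], indexMode, buf)
    else if ch = '[' then ((if token ≠ [] then parts ++ [token] else parts), [], true, [])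
    else (parts, token ++ [ch], indexMode, buf)

def json_path_to_pointer (path : String) : String :=
  let text := PySem.Chars.strip path.toList
  if text = [] ∨ text = ['$'] then ""
  else if !(PySem.Chars.startswith text ['$']) then ""
  else
    -- for ch in text[1:]:  (text[1:] = drop 1, PySem.List.slice_from_one)
    let st := List.foldl pvStepA ([], [], false, []) (text.drop 1)
    let parts := if st.2.1 ≠ [] then st.1 ++ [st.2.1] else st.1
    if parts = [] then ""
    else String.ofList ('/' :: PySem.Chars.join ['/'] (List.map pvEscape parts))

-- ===== PORT B =====
def pvNotSep (c : Char) : Bool := !(c == '.') && !(c == '[')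
def pvNotRB (c : Char) : Bool := !(c == ']')

-- B's while-loop over the cursor i, transcribed as recursion on the remaining suffix;
-- the inner while-scans 'j = i+1; while j < n and …' are the takeWhile runs sliced out.
def pvTokB : List Char → List (List Char)
  | [] => []
  | c :: rest =>
    if c = '.' then pvTokB rest
    else if c = '[' then
      let w := rest.takeWhile pvNotRB
      if w.length = rest.length then []      -- j == n: unterminated bracket
      else (if w ≠ [] then [w] else []) ++ pvTokB (rest.drop (w.length + 1))
    else
      let w := rest.takeWhile pvNotSep
      (c :: w) :: pvTokB (rest.drop w.length)
termination_by cs => cs.length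
decreasing_by
  · simp
  · simp only [List.length_drop, List.length_cons]; omega
  · simp only [List.length_drop, List.length_cons]; omega

def json_path_to_pointer_alt (path : String) : String :=
  let text := PySem.Chars.strip path.toList
  if text = [] ∨ text = ['$'] then ""
  else if !(PySem.Chars.startswith text ['$']) then ""
  else
    let parts := pvTokB (text.drop 1)
    if parts = [] then ""
    else String.ofList ('/' :: PySem.Chars.join ['/'] (List.map pvEscape parts))

-- ===== PRECONDITION & SPEC =====
def Spec_json_path_to_pointer (path : String) (out : String) : Prop := out = json_path_to_pointer_alt path
instance (path : String) (out : String) : Decidable (Spec_json_path_to_pointer path out) := by unfold Spec_json_path_to_pointer; infer_instance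

-- ===== CLAIM (what is proved, stated in full; the proofs are below) =====
def Claim_equal_json_path_to_pointer : Prop := ∀ (path : String), Dom_json_path_to_pointer path → Spec_json_path_to_pointer path (json_path_to_pointer path)

-- ===== LEMMAS AND PROOFS =====

-- what A does with its final state
def pvFinish (st : List (List Char) × List Char × Bool × List Char) : List (List Char) :=
  if st.2.1 ≠ [] then st.1 ++ [st.2.1] else st.1

-- character-structural specification of A's state machine (mode, accumulator, rest)
def pvSpec : Bool → List Char → List Char → List (List Char)
  | false, acc, [] => if acc ≠ [] then [acc] else []
  | true, _, [] => []
  | true, buf, c :: cs =>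
      if c = ']' then (if buf ≠ [] then [buf] else []) ++ pvSpec false [] cs
      else pvSpec true (buf ++ [c]) cs
  | false, acc, c :: cs =>
      if c = '.' then (if acc ≠ [] then [acc] else []) ++ pvSpec false [] cs
      else if c = '[' then (if acc ≠ [] then [acc] else []) ++ pvSpec true [] cs
      else pvSpec false (acc ++ [c]) cs

theorem pvFoldInv (cs : List Char) :
    (∀ (parts : List (List Char)) (acc buf : List Char),
       pvFinish (List.foldl pvStepA (parts, acc, false, buf) cs) = parts ++ pvSpec false acc cs)
  ∧ (∀ (parts : List (List Char)) (buf : List Char),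
       pvFinish (List.foldl pvStepA (parts, [], true, buf) cs) = parts ++ pvSpec true buf cs) := by
  induction cs with
  | nil =>
    constructor
    · intro parts acc buf
      simp only [List.foldl_nil, pvFinish, pvSpec]
      split <;> simp
    · intro parts buf
      simp [pvFinish, pvSpec]
  | cons c cs ih =>
    constructor
    · intro parts acc buf
      by_cases hd : c = '.'
      · subst hd
        simp only [List.foldl_cons, pvStepA, Bool.false_eq_true, reduceIte, pvSpec]
        rw [ih.1]
        split <;> simp
      · by_cases hb : c = '['
        · subst hb
          simp only [List.foldl_cons, pvStepA, Bool.false_eq_true, reduceIte,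
            if_neg (by decide : ¬ ('[' : Char) = '.'), pvSpec]
          rw [ih.2]
          split <;> simp
        · simp only [List.foldl_cons, pvStepA, Bool.false_eq_true, reduceIte,
            if_neg hd, if_neg hb, pvSpec]
          rw [ih.1]
    · intro parts buf
      by_cases h : c = ']'
      · subst h
        simp only [List.foldl_cons, pvStepA, reduceIte, pvSpec]
        rw [ih.1]
        split <;> simp
      · simp only [List.foldl_cons, pvStepA, reduceIte, if_neg h, pvSpec]
        rw [ih.2]

theorem pvSpec_token (cs : List Char) : ∀ (acc : List Char), acc ≠ [] →
    pvSpec false acc cs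
      = (acc ++ cs.takeWhile pvNotSep) :: pvSpec false [] (cs.drop (cs.takeWhile pvNotSep).length) := by
  induction cs with
  | nil => intro acc h; simp [pvSpec, h]
  | cons c cs ih =>
    intro acc h
    by_cases hd : c = '.'
    · subst hd
      simp [pvSpec, pvNotSep, h]
    · by_cases hb : c = '['
      · subst hb
        simp [pvSpec, pvNotSep, hd, h]
      · have hn : pvNotSep c = true := by simp [pvNotSep, hd, hb]
        simp only [pvSpec, if_neg hd, if_neg hb, List.takeWhile_cons, hn, reduceIte]
        rw [ih (acc ++ [c]) (by simp)]
        simp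

theorem pvSpec_bracket (cs : List Char) : ∀ (buf : List Char),
    pvSpec true buf cs
      = (if (cs.takeWhile pvNotRB).length = cs.length then []
         else (if buf ++ cs.takeWhile pvNotRB ≠ [] then [buf ++ cs.takeWhile pvNotRB] else [])
              ++ pvSpec false [] (cs.drop ((cs.takeWhile pvNotRB).length + 1))) := by
  induction cs with
  | nil => intro buf; simp [pvSpec]
  | cons c cs ih =>
    intro buf
    by_cases h : c = ']'
    · subst h
      simp [pvSpec, pvNotRB]
    · have hn : pvNotRB c = true := by simp [pvNotRB, h]
      simp only [pvSpec, if_neg h, List.takeWhile_cons, hn, reduceIte, List.length_cons]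
      rw [ih (buf ++ [c])]
      have hle : (cs.takeWhile pvNotRB).length ≤ cs.length :=
        (List.takeWhile_prefix _).length_le
      by_cases hl : (cs.takeWhile pvNotRB).length = cs.length
      · simp [hl]
      · simp only [if_neg hl, if_neg (by omega : ¬ ((cs.takeWhile pvNotRB).length + 1 = cs.length + 1))]
        simp

theorem pvSpec_eq_pvTokB : ∀ (n : Nat) (cs : List Char), cs.length ≤ n →
    pvSpec false [] cs = pvTokB cs := by
  intro n
  induction n with
  | zero =>
    intro cs h
    have : cs = [] := by cases cs <;> simp_all
    subst this; simp [pvSpec, pvTokB]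
  | succ n ih =>
    intro cs h
    cases cs with
    | nil => simp [pvSpec, pvTokB]
    | cons c cs =>
      have h' : cs.length ≤ n := by simp at h; omega
      by_cases hd : c = '.'
      · subst hd
        rw [pvTokB]
        simp only [pvSpec, reduceIte, ne_eq, not_true_eq_false]
        rw [ih cs h']
        simp
      · by_cases hb : c = '['
        · subst hb
          rw [pvTokB]
          simp only [pvSpec, if_neg (by decide : ¬ ('[' : Char) = '.'), reduceIte]
          rw [pvSpec_bracket]
          have hle : (cs.takeWhile pvNotRB).length ≤ cs.length :=
            (List.takeWhile_prefix _).length_le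
          by_cases hl : (cs.takeWhile pvNotRB).length = cs.length
          · simp [hl]
          · rw [ih (cs.drop ((cs.takeWhile pvNotRB).length + 1))
              (by rw [List.length_drop]; omega)]
            simp [hl]
        · rw [pvTokB]
          simp only [pvSpec, if_neg hd, if_neg hb, List.nil_append]
          rw [pvSpec_token cs [c] (by simp)]
          rw [ih (cs.drop (cs.takeWhile pvNotSep).length)
            (by rw [List.length_drop]; omega)]
          simp

theorem pvParts_eq (cs : List Char) :
    (let st := List.foldl pvStepA ([], [], false, []) cs
     if st.2.1 ≠ [] then st.1 ++ [st.2.1] else st.1) = pvTokB cs := by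
  have h := (pvFoldInv cs).1 [] [] []
  have h2 := pvSpec_eq_pvTokB cs.length cs (le_refl _)
  simpa [pvFinish] using h.trans (by simpa using h2)

-- ===== VERDICT (by name: the statement is the Claim_ definition above) =====
theorem json_path_to_pointer_spec : Claim_equal_json_path_to_pointer := by
  intro path _
  unfold Spec_json_path_to_pointer json_path_to_pointer json_path_to_pointer_alt
  simp only []
  split
  · rfl
  · split
    · rfl
    · rw [pvParts_eq]
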